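-- pv_equiv track=rewrite | github.com/ayoubzrira/semestre5 | semestre5/python/test/exam_mi_semestre2016/fichiers_fournis/iterateurs.py | couples
-- ===== SOURCE A (Python) =====
-- def couples(donnees):
--     iterateurs = iter(donnees)
--     debut = next(iterateurs)
--     prec = debut
--     for cour in iterateurs:
--         yield prec,cour
--         prec = cour
--     yield prec,debut
-- ===== SOURCE B (Python) =====
-- def couples(donnees):
--     it = iter(donnees)
--     debut = next(it)
--     valeurs = [debut] + list(it)
--     n = len(valeurs)
--     for i in range(n):
--         yield valeurs[i], valeurs[(i + 1) % n]
-- ===== Notes on version B (the rewrite author's own statement) =====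
-- stated objective: alternative
-- what changed: Replaces A's streaming carry-variable (prec) plus trailing wrap-around yield with materializing the values into a list and one index loop yielding (valeurs[i], valeurs[(i+1) % n]) via modular wraparound.
import Mathlib
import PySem

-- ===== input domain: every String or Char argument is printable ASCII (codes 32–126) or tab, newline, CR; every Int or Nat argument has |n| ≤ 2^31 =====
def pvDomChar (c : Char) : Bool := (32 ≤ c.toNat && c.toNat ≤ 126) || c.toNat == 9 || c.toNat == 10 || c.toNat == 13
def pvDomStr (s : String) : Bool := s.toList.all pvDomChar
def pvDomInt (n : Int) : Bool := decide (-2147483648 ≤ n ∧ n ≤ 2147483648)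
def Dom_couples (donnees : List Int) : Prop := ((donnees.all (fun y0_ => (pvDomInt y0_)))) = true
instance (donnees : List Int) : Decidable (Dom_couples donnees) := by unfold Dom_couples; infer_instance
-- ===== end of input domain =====

-- B materializes the values and yields (valeurs[i], valeurs[(i+1) % n]) by index, instead of
-- A's carry-variable streaming with a trailing wrap-around yield. Same cost; return value only
-- (both are generators in Python, ported as the list of yielded pairs).

-- ===== PORT A =====
-- the 'for cour in iterateurs' loop with carry prec, followed by the trailing 'yield prec, debut'
def couplesLoop (debut : Int) (prec : Int) : List Int → List (Int × Int)
  | [] => [(prec, debut)]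
  | cour :: rest => (prec, cour) :: couplesLoop debut cour rest

def couples (donnees : List Int) : List (Int × Int) :=
  match donnees with
  | [] => []  -- next(iterateurs) raises on empty input; excluded by Pre_couples
  | debut :: rest => couplesLoop debut debut rest

-- ===== PORT B =====
def couples_alt (donnees : List Int) : List (Int × Int) :=
  match donnees with
  | [] => []  -- next(it) raises on empty input; excluded by Pre_couples
  | debut :: rest =>
    let valeurs := debut :: rest
    let n : Int := valeurs.length
    (PySem.List.pyRange 0 n 1).map (fun i =>
      (PySem.List.pyGetD valeurs i 0, PySem.List.pyGetD valeurs (PySem.Int.mod (i + 1) n) 0))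

-- ===== PRECONDITION & SPEC =====
-- Pre_ excludes only the empty list, on which A (and B alike) raises RuntimeError
-- (StopIteration from next() inside a generator).
def Pre_couples (donnees : List Int) : Prop := donnees ≠ []
instance (donnees : List Int) : Decidable (Pre_couples donnees) := by unfold Pre_couples; infer_instance
def pvWitness_couples : List Int := [1, 2, 3]
def Spec_couples (donnees : List Int) (out : List (Int × Int)) : Prop := out = couples_alt donnees
instance (donnees : List Int) (out : List (Int × Int)) : Decidable (Spec_couples donnees out) := by unfold Spec_couples; infer_instance

-- ===== CLAIM (what is proved, stated in full; the proofs are below) =====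
def Claim_equal_couples : Prop := ∀ (donnees : List Int), Dom_couples donnees → Pre_couples donnees → Spec_couples donnees (couples donnees)

-- ===== LEMMAS AND PROOFS =====

-- closed form of A's loop: pairs of (prec :: l) with its successor list, wrapping to debut
theorem couplesLoop_eq_zip (debut : Int) (l : List Int) : ∀ (prec : Int),
    couplesLoop debut prec l = (prec :: l).zip (l ++ [debut]) := by
  induction l with
  | nil => intro prec; simp [couplesLoop]
  | cons cour rest ih => intro prec; simp [couplesLoop, ih cour, List.zip]

theorem couples_alt_eq_zip (debut : Int) (rest : List Int) :
    couples_alt (debut :: rest) = (debut :: rest).zip (rest ++ [debut]) := by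
  set v : List Int := debut :: rest with hv
  have hvne : v ≠ [] := by simp [hv]
  have hlen : (rest ++ [debut]).length = v.length := by simp [hv]
  show (PySem.List.pyRange 0 (v.length : Int) 1).map (fun i =>
      (PySem.List.pyGetD v i 0, PySem.List.pyGetD v (PySem.Int.mod (i + 1) (v.length : Int)) 0))
      = v.zip (rest ++ [debut])
  rw [PySem.List.pyRange_one]
  apply List.ext_getElem
  · simp [hlen]
  · intro k hk1 hk2
    simp only [List.length_map, List.length_range] at hk1
    have hkv : k < v.length := by omega
    simp only [List.getElem_map, List.getElem_range, List.getElem_zip]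
    have h1 : PySem.List.pyGetD v ((0 : Int) + (k : Int)) 0 = v[k] := by
      rw [zero_add, PySem.List.pyGetD_natCast]; simp [List.getD, hkv]
    rw [h1]
    have hmod : PySem.Int.mod ((0 : Int) + (k : Int) + 1) (v.length : Int)
        = if k + 1 < v.length then ((k + 1 : Nat) : Int) else 0 := by
      simp only [zero_add, PySem.Int.mod]
      split_ifs with h
      · rw [Int.fmod_eq_of_lt (by positivity) (by omega)]; push_cast; ring
      · rw [show ((k : Int) + 1) = (v.length : Int) by omega]
        exact Int.fmod_self
    rw [hmod]
    split_ifs with h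
    · -- interior index: v[k+1] = (rest ++ [debut])[k]
      rw [PySem.List.pyGetD_natCast]
      have : (rest ++ [debut])[k] = v[k + 1] := by
        have hkr : k < rest.length := by simp [hv] at h ⊢; omega
        rw [List.getElem_append_left hkr]
        simp [hv]
      simp [List.getD, h, this]
    · -- wrap-around: v[0] = debut = (rest ++ [debut])[k] with k = rest.length
      have hk : k = rest.length := by simp [hv] at hkv h; omega
      have : (rest ++ [debut])[k] = debut := by
        rw [List.getElem_append_right (by omega)]; simp [hk]
      rw [this, PySem.List.pyGetD_zero]
      simp [hv, List.getD]

-- ===== VERDICT (by name: the statement is the Claim_ definition above) =====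
theorem couples_spec : Claim_equal_couples := by
  intro donnees _ hpre
  unfold Spec_couples
  match donnees with
  | [] => exact absurd rfl hpre
  | debut :: rest =>
    rw [couples_alt_eq_zip]
    simp [couples, couplesLoop_eq_zip]
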